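-- pv_equiv track=rewrite | github.com/shwan97/Algorithm-study | divide_grid_by_two.py | solution
-- ===== SOURCE A (Python) =====
-- def solution(n, wires):
--     number_of_descendant = [0 for _ in range(n+1)]
--     adjacent_list = [[] for _ in range(n+1)]
--     visited = [False for _ in range(n+1)]
--
--     # 인접리스트 생성
--     for wire in wires:
--         adjacent_list[wire[0]].append(wire[1])
--         adjacent_list[wire[1]].append(wire[0])
--
--     # root는 1번노드로 가정하고, DFS로 각 노드의 자손 노드의 개수를 찾는다
--     number_of_descendant[1] = dfs(1, adjacent_list, number_of_descendant, visited)
--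
--     # 자손 노드의 개수에 1을 더하여 각 노드의 크기를 계산한다.
--     # 노드의 크기 = 자기 자신을 root로 하는 서브트리의 모든 노드의 개수
--     subtree = list(map(lambda x:x+1, number_of_descendant[2:]))
--     absolute = list(map(lambda x: abs((n-2*x)), subtree))
--     answer = min(absolute)
--
--     return answer
--
-- def dfs(num, adjacent_list, number_of_descendent, visited):
--     visited[num] = True
--     if len(adjacent_list[num]) > 1 or num == 1:
--         total = 0
--         for idx in adjacent_list[num]:
--             if not visited[idx]:
--                 number_of_descendent[idx] = dfs(idx, adjacent_list, number_of_descendent, visited)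
--                 total += number_of_descendent[idx]
--         number_of_descendent[num] = len(adjacent_list[num]) - 1 + total
--         return number_of_descendent[num]
--     else:
--         return 0
-- ===== SOURCE B (Python) =====
-- def solution(n, wires):
--     adjacent_list = [[] for _ in range(n + 1)]
--     for wire in wires:
--         adjacent_list[wire[0]].append(wire[1])
--         adjacent_list[wire[1]].append(wire[0])
--     visited = [False] * (n + 1)
--     number_of_descendant = [0] * (n + 1)
--     # iterative DFS with an explicit stack of frames (node, next child position, running total)
--     visited[1] = True
--     stack = [(1, 0, 0)]
--     while stack:
--         num, i, total = stack.pop()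
--         nb = adjacent_list[num]
--         if len(nb) > 1 or num == 1:
--             while i < len(nb) and visited[nb[i]]:
--                 i += 1
--             if i < len(nb):
--                 child = nb[i]
--                 visited[child] = True
--                 stack.append((num, i + 1, total))
--                 stack.append((child, 0, 0))
--             else:
--                 number_of_descendant[num] = len(nb) - 1 + total
--                 if stack:
--                     pnum, pi, ptotal = stack.pop()
--                     stack.append((pnum, pi, ptotal + number_of_descendant[num]))
--         # a non-root node with at most one neighbour is a leaf: 0 descendants, nothing to do
--     best = None
--     for v in range(2, n + 1):
--         cand = abs(n - 2 * (number_of_descendant[v] + 1))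
--         if best is None or cand < best:
--             best = cand
--     return best
-- ===== Notes on version B (the rewrite author's own statement) =====
-- stated objective: alternative
-- what changed: A's recursive DFS (with mutated visited/descendant arrays and a two-map-then-min finish) is replaced by an iterative DFS over an explicit stack of (node, next-child-index, running-total) frames plus a single running-minimum pass over nodes 2..n; no recursion and no intermediate mapped lists.
import Mathlib
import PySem

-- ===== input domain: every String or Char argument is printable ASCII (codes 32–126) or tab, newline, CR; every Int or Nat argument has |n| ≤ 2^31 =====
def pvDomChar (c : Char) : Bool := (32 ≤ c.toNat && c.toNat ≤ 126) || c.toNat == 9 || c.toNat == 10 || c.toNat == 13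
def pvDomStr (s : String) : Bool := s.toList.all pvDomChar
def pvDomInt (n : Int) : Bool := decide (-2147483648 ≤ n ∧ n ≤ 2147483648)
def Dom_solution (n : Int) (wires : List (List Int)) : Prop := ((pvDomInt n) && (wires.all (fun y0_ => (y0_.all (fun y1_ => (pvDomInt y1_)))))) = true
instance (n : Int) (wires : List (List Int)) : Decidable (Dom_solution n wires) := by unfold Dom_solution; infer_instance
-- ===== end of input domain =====

-- B replaces A's recursive DFS by an explicit-stack iterative DFS (frames carry the next child
-- position and a running total) and folds the final minimum in one running-min pass; same cost,
-- different decomposition ("alternative").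


-- ===== PORT A =====
-- the inner `for idx in adjacent_list[num]` loop of dfs; `dfs` is the recursive call (A's dfs at
-- one fuel less). State threading (visited, number_of_descendent) replaces Python's in-place
-- mutation; fuel bounds the recursion depth (recursion enters only unvisited nodes, so
-- n+2 fuel is always enough — proved in sufD below).
def childA (dfs : Int → List Bool → List Int → Option (Int × List Bool × List Int)) :
    List Int → List Bool → List Int → Int → Option (Int × List Bool × List Int)
  | [], v, d, total => some (total, v, d)
  | idx :: rest, v, d, total =>
    if PySem.List.pyGetD v idx false then
      childA dfs rest v d total
    else
      match dfs idx v d with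
      | none => none
      | some (r, v2, d2) =>
        let d3 := PySem.List.pySetD d2 idx r      -- number_of_descendent[idx] = dfs(idx, ...)
        childA dfs rest v2 d3 (total + PySem.List.pyGetD d3 idx 0)   -- total += number_of_descendent[idx]

def dfsA (adj : List (List Int)) : Nat → Int → List Bool → List Int → Option (Int × List Bool × List Int)
  | 0, _, _, _ => none
  | fuel+1, num, visited, desc =>
    let visited1 := PySem.List.pySetD visited num true   -- visited[num] = True
    let nbrs := PySem.List.pyGetD adj num []
    if 1 < nbrs.length ∨ num = 1 then                    -- len(adjacent_list[num]) > 1 or num == 1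
      match childA (dfsA adj fuel) nbrs visited1 desc 0 with
      | none => none
      | some (total, v2, d2) =>
        let d3 := PySem.List.pySetD d2 num ((nbrs.length : Int) - 1 + total)
        some (PySem.List.pyGetD d3 num 0, v2, d3)        -- return number_of_descendent[num]
    else
      some (0, visited1, desc)

-- the adjacency-list building loop (pySetD/pyGetD: Python's indexing incl. negative wraparound)
def buildAdjA (n : Int) (wires : List (List Int)) : List (List Int) :=
  wires.foldl (fun adj wire =>
    let a := PySem.List.pyGetD wire 0 0
    let b := PySem.List.pyGetD wire 1 0
    let adj1 := PySem.List.pySetD adj a ((PySem.List.pyGetD adj a []) ++ [b])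
    PySem.List.pySetD adj1 b ((PySem.List.pyGetD adj1 b []) ++ [a]))
    (List.replicate (n+1).toNat ([] : List Int))

def solution (n : Int) (wires : List (List Int)) : Int :=
  let adj := buildAdjA n wires
  let visited0 := List.replicate (n+1).toNat false
  let desc0 := List.replicate (n+1).toNat (0 : Int)
  match dfsA adj ((n+1).toNat + 1) 1 visited0 desc0 with
  | none => 0                                            -- unreachable under Pre_ (fuel suffices)
  | some (r, _, df) =>
    let descf := PySem.List.pySetD df 1 r                -- number_of_descendant[1] = dfs(1, ...)
    let subtree := (PySem.List.slice descf (some 2) none).map (fun x => x + 1)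
    let absolute := subtree.map (fun x => |n - 2 * x|)
    (PySem.List.min? absolute (fun x => x)).getD 0       -- min(absolute); nonempty under Pre_

-- ===== PORT B =====
-- `while i < len(nb) and visited[nb[i]]: i += 1`, run on the suffix nb[i:] (exact: the suffix's
-- head is nb[i])
def advB (visited : List Bool) : List Int → Nat → Nat
  | [], i => i
  | x :: rest, i => if PySem.List.pyGetD visited x false then advB visited rest (i+1) else i

-- `while stack:` — one constructor step per pop; fuel 3*(n+1)+3 is always enough (proved below)
def loopB (adj : List (List Int)) : Nat → List (Int × Nat × Int) → List Bool → List Int → Option (List Bool × List Int)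
  | _, [], v, d => some (v, d)
  | 0, _ :: _, _, _ => none
  | fuel+1, (num, i, total) :: S, v, d =>
    let nbrs := PySem.List.pyGetD adj num []
    if 1 < nbrs.length ∨ num = 1 then
      let j := advB v (nbrs.drop i) i
      if j < nbrs.length then
        let child := nbrs.getD j 0
        loopB adj fuel ((child, 0, 0) :: (num, j+1, total) :: S) (PySem.List.pySetD v child true) d
      else
        let d2 := PySem.List.pySetD d num ((nbrs.length : Int) - 1 + total)
        match S with
        | [] => loopB adj fuel [] v d2
        | (pn, pi, pt) :: S' => loopB adj fuel ((pn, pi, pt + PySem.List.pyGetD d2 num 0) :: S') v d2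
    else loopB adj fuel S v d

def buildAdjB (n : Int) (wires : List (List Int)) : List (List Int) :=
  wires.foldl (fun adj wire =>
    let a := PySem.List.pyGetD wire 0 0
    let b := PySem.List.pyGetD wire 1 0
    let adj1 := PySem.List.pySetD adj a ((PySem.List.pyGetD adj a []) ++ [b])
    PySem.List.pySetD adj1 b ((PySem.List.pyGetD adj1 b []) ++ [a]))
    (List.replicate (n+1).toNat ([] : List Int))

def solution_alt (n : Int) (wires : List (List Int)) : Int :=
  let adj := buildAdjB n wires
  let v0 := PySem.List.pySetD (List.replicate (n+1).toNat false) 1 true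
  let d0 := List.replicate (n+1).toNat (0 : Int)
  match loopB adj (3 * (n+1).toNat + 3) [(1, 0, 0)] v0 d0 with
  | none => 0                                            -- unreachable under Pre_ (fuel suffices)
  | some (_, desc) =>
    ((PySem.List.pyRange 2 (n+1) 1).foldl (fun best v =>
      let cand := |n - 2 * (PySem.List.pyGetD desc v 0 + 1)|
      match best with
      | none => some cand
      | some b => if cand < b then some cand else some b) none).getD 0   -- best is None → 0: n < 2 only, outside Pre_

-- ===== PRECONDITION & SPEC =====
-- Pre_ excludes exactly the inputs on which A raises: n < 2 (ValueError: min() of an empty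
-- sequence, or IndexError on visited[1]), a wire with fewer than two entries (IndexError), and
-- a wire endpoint outside -(n+1)..n (IndexError on the length-(n+1) lists).
def Pre_solution (n : Int) (wires : List (List Int)) : Prop :=
  2 ≤ n ∧ ∀ w ∈ wires, 2 ≤ w.length ∧
    -(n+1) ≤ PySem.List.pyGetD w 0 0 ∧ PySem.List.pyGetD w 0 0 ≤ n ∧
    -(n+1) ≤ PySem.List.pyGetD w 1 0 ∧ PySem.List.pyGetD w 1 0 ≤ n
instance (n : Int) (wires : List (List Int)) : Decidable (Pre_solution n wires) := by
  unfold Pre_solution; infer_instance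

def pvWitness_solution : Int × List (List Int) := (4, [[1, 2], [2, 3], [2, 4]])

def Spec_solution (n : Int) (wires : List (List Int)) (out : Int) : Prop := out = solution_alt n wires
instance (n : Int) (wires : List (List Int)) (out : Int) : Decidable (Spec_solution n wires out) := by
  unfold Spec_solution; infer_instance

-- ===== CLAIM (what is proved, stated in full; the proofs are below) =====
def Claim_equal_solution : Prop := ∀ (n : Int) (wires : List (List Int)), Dom_solution n wires → Pre_solution n wires → Spec_solution n wires (solution n wires)

-- ===== LEMMAS AND PROOFS =====

-- basic list facts used throughout
theorem set_getD_self (l : List Int) (k : Nat) : l.set k (l.getD k 0) = l := by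
  induction l generalizing k with
  | nil => rfl
  | cons a t ih => cases k with
    | zero => simp [List.getD]
    | succ m => simp only [List.set, List.getD] at *; simp [ih m]

theorem fcount_set_le (v : List Bool) (k : Nat) : (v.set k true).count false ≤ v.count false := by
  induction v generalizing k with
  | nil => simp
  | cons a t ih => cases k with
    | zero => cases a <;> simp
    | succ m => cases a <;> simp <;> exact ih m

theorem fcount_set_eq (v : List Bool) (k : Nat) (h1 : k < v.length) (h2 : v.getD k false = false) :
    (v.set k true).count false + 1 = v.count false := by
  induction v generalizing k with
  | nil => simp at h1
  | cons a t ih =>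
    cases k with
    | zero => simp [List.getD] at h2; subst h2; simp
    | succ m =>
      simp only [List.length_cons, Nat.add_lt_add_iff_right] at h1
      simp only [List.getD, List.getElem?_cons_succ] at h2
      have := ih m h1 (by simp [List.getD, h2])
      cases a <;> simp <;> omega

theorem getD_set_true (v : List Bool) (k j : Nat) (h : v.getD j false = true) :
    (v.set k true).getD j false = true := by
  induction v generalizing k j with
  | nil => simp [List.getD] at h
  | cons a t ih =>
    cases k with
    | zero => cases j <;> simp_all [List.getD]
    | succ m => cases j with
      | zero => simp_all [List.getD]
      | succ jj => simp only [List.set, List.getD, List.getElem?_cons_succ] at *; exact ih m jj h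

theorem getD_set_self_true (v : List Bool) (k : Nat) (h : k < v.length) :
    (v.set k true).getD k false = true := by
  simp [List.getD, h]

theorem getD_set_ne_bool (v : List Bool) (k j : Nat) (h : j ≠ k) (b : Bool) :
    (v.set k b).getD j false = v.getD j false := by
  simp [List.getD, List.getElem?_set_ne (Ne.symm h)]

theorem getD_set_ne_int (v : List Int) (k j : Nat) (h : j ≠ k) (x : Int) :
    (v.set k x).getD j 0 = v.getD j 0 := by
  simp [List.getD, List.getElem?_set_ne (Ne.symm h)]

theorem getD_replicate_bool (N j : Nat) : ((List.replicate N false).getD j false) = false := by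
  simp [List.getD]

theorem getD_replicate_int (N j : Nat) : ((List.replicate N (0:Int)).getD j 0) = 0 := by
  simp [List.getD]

-- bridge: Python indexing (pyGetD/pySetD, with negative wraparound) as Nat-indexed getD/set
def nrm (L : Nat) (x : Int) : Nat := if 0 ≤ x then x.toNat else L - (-x).toNat

def InR (L : Nat) (x : Int) : Prop := -(L:Int) ≤ x ∧ x < (L:Int)

theorem pyIdx_in (L : Nat) (x : Int) (h1 : -(L:Int) ≤ x) (h2 : x < (L:Int)) :
    PySem.List.pyIdx? L x = some (nrm L x) := by
  simp only [PySem.List.pyIdx?, nrm]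
  by_cases h3 : 0 ≤ x
  · rw [if_pos h3, if_pos h2, if_pos h3]
  · rw [if_neg h3, if_pos h1, if_neg h3]

theorem nrm_lt (L : Nat) (x : Int) (h1 : -(L:Int) ≤ x) (h2 : x < (L:Int)) : nrm L x < L := by
  simp only [nrm]; split_ifs <;> omega

theorem pyGetD_nrmL {α : Type} (v : List α) (x : Int) (d : α) (L : Nat) (hlen : v.length = L)
    (h1 : -(L:Int) ≤ x) (h2 : x < (L:Int)) :
    PySem.List.pyGetD v x d = v.getD (nrm L x) d := by
  subst hlen
  simp [PySem.List.pyGetD, PySem.List.pyGet?, pyIdx_in v.length x h1 h2, List.getD]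

theorem pySetD_nrmL {α : Type} (v : List α) (x : Int) (b : α) (L : Nat) (hlen : v.length = L)
    (h1 : -(L:Int) ≤ x) (h2 : x < (L:Int)) :
    PySem.List.pySetD v x b = v.set (nrm L x) b := by
  subst hlen
  simp [PySem.List.pySetD, PySem.List.pySet?, pyIdx_in v.length x h1 h2]

theorem pySetD_idem {α : Type} (v : List α) (x : Int) (b : α) :
    PySem.List.pySetD (PySem.List.pySetD v x b) x b = PySem.List.pySetD v x b := by
  simp only [PySem.List.pySetD, PySem.List.pySet?]
  cases h : PySem.List.pyIdx? v.length x with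
  | none => simp [h]
  | some k =>
    simp only [h, Option.map_some, Option.getD_some, List.length_set]
    simp [List.set_set]

theorem pyGetD_mem_or {α : Type} (l : List α) (x : Int) (d : α) :
    PySem.List.pyGetD l x d ∈ l ∨ PySem.List.pyGetD l x d = d := by
  simp only [PySem.List.pyGetD, PySem.List.pyGet?]
  cases h : PySem.List.pyIdx? l.length x with
  | none => simp
  | some k =>
    simp only [Option.bind_some]
    cases hk : l[k]? with
    | none => simp
    | some y => simp only [Option.getD_some]; exact Or.inl (List.mem_of_getElem? hk)

theorem mem_pySetD {α : Type} {lst : α} {l : List α} {x : Int} {v : α}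
    (h : lst ∈ PySem.List.pySetD l x v) : lst ∈ l ∨ lst = v := by
  simp only [PySem.List.pySetD, PySem.List.pySet?] at h
  cases hi : PySem.List.pyIdx? l.length x with
  | none => rw [hi] at h; simp at h; exact Or.inl h
  | some k => rw [hi] at h; simp at h; exact List.mem_or_eq_of_mem_set h

-- proof-side state predicates
def AdjOK (adj : List (List Int)) (L : Nat) : Prop :=
  ∀ lst ∈ adj, ∀ x ∈ lst, InR L x

def VInv (v : List Bool) (d : List Int) : Prop :=
  ∀ j : Nat, v.getD j false = false → d.getD j 0 = 0

theorem adjOK_getD {adj : List (List Int)} {L : Nat} (h : AdjOK adj L) (num : Int) :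
    ∀ x ∈ PySem.List.pyGetD adj num [], InR L x := by
  intro x hx
  rcases pyGetD_mem_or adj num ([] : List Int) with hm | he
  · exact h _ hm x hx
  · rw [he] at hx; simp at hx

theorem inv_set_true {v : List Bool} {d : List Int} (h : VInv v d) (k : Nat) :
    VInv (v.set k true) d := by
  intro j hj
  by_cases hjk : j = k
  · subst hjk
    by_cases hk : j < v.length
    · rw [getD_set_self_true v j hk] at hj; simp at hj
    · rw [List.set_eq_of_length_le (Nat.le_of_not_lt hk)] at hj; exact h j hj
  · rw [getD_set_ne_bool v k j hjk] at hj; exact h j hj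

theorem inv_set_visited {v : List Bool} {d : List Int} (h : VInv v d) (k : Nat)
    (hk : v.getD k false = true) (x : Int) : VInv v (d.set k x) := by
  intro j hj
  have hjk : j ≠ k := by intro he; subst he; rw [hk] at hj; simp at hj
  rw [getD_set_ne_int d k j hjk]; exact h j hj

-- ===== the master invariant of A's dfs =====
def MDstmt (adj : List (List Int)) (fuel : Nat) : Prop :=
  ∀ num v d r v' d', v.length = d.length → adj.length = v.length → AdjOK adj v.length →
    InR v.length num →
    v.getD (nrm v.length num) false = false → VInv v d →
    dfsA adj fuel num v d = some (r, v', d') →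
    v'.length = v.length ∧ d'.length = d.length ∧
    (∀ j : Nat, (v.set (nrm v.length num) true).getD j false = true → v'.getD j false = true) ∧
    v'.count false ≤ (v.set (nrm v.length num) true).count false ∧
    VInv v' d' ∧ PySem.List.pyGetD d' num 0 = r

def MCstmt (adj : List (List Int)) (fuel : Nat) : Prop :=
  ∀ lst v d total t' v' d', v.length = d.length → adj.length = v.length → AdjOK adj v.length →
    (∀ x ∈ lst, InR v.length x) → VInv v d →
    childA (dfsA adj fuel) lst v d total = some (t', v', d') →
    v'.length = v.length ∧ d'.length = d.length ∧
    (∀ j : Nat, v.getD j false = true → v'.getD j false = true) ∧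
    v'.count false ≤ v.count false ∧ VInv v' d'

theorem masterC (adj : List (List Int)) (fuel : Nat) (hMD : MDstmt adj fuel) : MCstmt adj fuel := by
  intro lst
  induction lst with
  | nil =>
    intro v d total t' v' d' hL hadjL hA hR hI hs
    simp only [childA, Option.some.injEq, Prod.mk.injEq] at hs
    obtain ⟨h1, h2, h3⟩ := hs
    subst h2; subst h3
    exact ⟨rfl, rfl, fun j h => h, le_refl _, hI⟩
  | cons idx rest ih =>
    intro v d total t' v' d' hL hadjL hA hR hI hs
    have hidx := hR idx (by simp)
    simp only [childA] at hs
    rw [pyGetD_nrmL v idx false v.length rfl hidx.1 hidx.2] at hs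
    by_cases hv : v.getD (nrm v.length idx) false
    · rw [if_pos hv] at hs
      exact ih v d total t' v' d' hL hadjL hA (fun x hx => hR x (List.mem_cons_of_mem _ hx)) hI hs
    · rw [if_neg hv] at hs
      cases hd : dfsA adj fuel idx v d with
      | none => rw [hd] at hs; simp at hs
      | some res =>
        obtain ⟨r, v2, d2⟩ := res
        rw [hd] at hs
        simp only [] at hs
        have hvfalse : v.getD (nrm v.length idx) false = false := by
          cases hx : v.getD (nrm v.length idx) false
          · rfl
          · exact absurd hx hv
        obtain ⟨e1, e2, e3, e4, e5, e6⟩ := hMD idx v d r v2 d2 hL hadjL hA hidx hvfalse hI hd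
        have hd2len : d2.length = v.length := by rw [e2, ← hL]
        have he6 : d2.getD (nrm v.length idx) 0 = r := by
          rw [← pyGetD_nrmL d2 idx 0 v.length hd2len hidx.1 hidx.2]; exact e6
        have hset : PySem.List.pySetD d2 idx r = d2 := by
          rw [pySetD_nrmL d2 idx r v.length hd2len hidx.1 hidx.2, ← he6]
          exact set_getD_self d2 (nrm v.length idx)
        rw [hset] at hs
        obtain ⟨f1, f2, f3, f4, f5⟩ := ih v2 d2 _ t' v' d'
          (by rw [e1, e2, hL])
          (by rw [e1]; exact hadjL)
          (by rw [e1]; exact hA)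
          (fun x hx => by rw [e1]; exact hR x (List.mem_cons_of_mem _ hx))
          e5 hs
        refine ⟨by rw [f1, e1], by rw [f2, e2], ?_, ?_, f5⟩
        · intro j hj
          exact f3 j (e3 j (getD_set_true v (nrm v.length idx) j hj))
        · calc v'.count false ≤ v2.count false := f4
            _ ≤ (v.set (nrm v.length idx) true).count false := e4
            _ ≤ v.count false := fcount_set_le v (nrm v.length idx)

theorem master (adj : List (List Int)) (fuel : Nat) : MDstmt adj fuel ∧ MCstmt adj fuel := by
  induction fuel with
  | zero =>
    have hD : MDstmt adj 0 := by
      intro num v d r v' d' _ _ _ _ _ _ hs; simp [dfsA] at hs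
    exact ⟨hD, masterC adj 0 hD⟩
  | succ f ih =>
    have hD : MDstmt adj (f+1) := by
      intro num v d r v' d' hL hadjL hA hIn hunv hI hs
      have hnn := nrm_lt v.length num hIn.1 hIn.2
      simp only [dfsA] at hs
      rw [pySetD_nrmL v num true v.length rfl hIn.1 hIn.2] at hs
      rw [pyGetD_nrmL adj num [] v.length hadjL hIn.1 hIn.2] at hs
      have hNR : ∀ x ∈ adj.getD (nrm v.length num) [], InR v.length x := by
        rw [← pyGetD_nrmL adj num [] v.length hadjL hIn.1 hIn.2]
        exact adjOK_getD hA num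
      by_cases hc : 1 < (adj.getD (nrm v.length num) []).length ∨ num = 1
      · rw [if_pos hc] at hs
        cases hch : childA (dfsA adj f) (adj.getD (nrm v.length num) [])
            (v.set (nrm v.length num) true) d 0 with
        | none => rw [hch] at hs; simp at hs
        | some res =>
          obtain ⟨total, v2, d2⟩ := res
          rw [hch] at hs
          simp only [Option.some.injEq, Prod.mk.injEq] at hs
          obtain ⟨hr, hv', hd'⟩ := hs
          subst hv'; subst hd'
          obtain ⟨g1, g2, g3, g4, g5⟩ := masterC adj f ih.1 (adj.getD (nrm v.length num) [])
            (v.set (nrm v.length num) true) d 0 total v2 d2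
            (by rw [List.length_set]; exact hL)
            (by rw [List.length_set]; exact hadjL)
            (by rw [List.length_set]; exact hA)
            (by rw [List.length_set]; exact hNR)
            (inv_set_true hI (nrm v.length num)) hch
          have hnum2 : v2.getD (nrm v.length num) false = true :=
            g3 (nrm v.length num) (getD_set_self_true v (nrm v.length num) hnn)
          have hd2len : d2.length = v.length := by rw [g2, ← hL]
          have hpset : PySem.List.pySetD d2 num ((adj.getD (nrm v.length num) []).length - 1 + total)
              = d2.set (nrm v.length num) ((adj.getD (nrm v.length num) []).length - 1 + total) :=
            pySetD_nrmL d2 num _ v.length hd2len hIn.1 hIn.2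
          refine ⟨by rw [g1, List.length_set], ?_, g3, g4, ?_, ?_⟩
          · rw [PySem.List.length_pySetD, g2]
          · rw [hpset]
            exact inv_set_visited g5 (nrm v.length num) hnum2 _
          · exact hr
      · rw [if_neg hc] at hs
        simp only [Option.some.injEq, Prod.mk.injEq] at hs
        obtain ⟨hr, hv', hd'⟩ := hs
        subst hv'; subst hd'
        refine ⟨List.length_set .., rfl, fun j h => h, le_refl _, inv_set_true hI (nrm v.length num), ?_⟩
        rw [← hr, pyGetD_nrmL d num 0 v.length (by rw [hL]) hIn.1 hIn.2]
        exact hI (nrm v.length num) hunv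
    exact ⟨hD, masterC adj (f+1) hD⟩

-- ===== fuel sufficiency for A's dfs =====
def SufDstmt (adj : List (List Int)) (fuel : Nat) : Prop :=
  ∀ num v d, v.length = d.length → adj.length = v.length → AdjOK adj v.length →
    InR v.length num →
    v.getD (nrm v.length num) false = false → VInv v d →
    (v.set (nrm v.length num) true).count false < fuel →
    (dfsA adj fuel num v d).isSome

def SufCstmt (adj : List (List Int)) (fuel : Nat) : Prop :=
  ∀ lst v d total, v.length = d.length → adj.length = v.length → AdjOK adj v.length →
    (∀ x ∈ lst, InR v.length x) → VInv v d →
    v.count false ≤ fuel →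
    (childA (dfsA adj fuel) lst v d total).isSome

theorem sufC (adj : List (List Int)) (fuel : Nat) (hSufD : SufDstmt adj fuel) : SufCstmt adj fuel := by
  intro lst
  induction lst with
  | nil => intro v d total _ _ _ _ _ _; simp [childA]
  | cons idx rest ih =>
    intro v d total hL hadjL hA hR hI hfc
    have hidx := hR idx (by simp)
    have hnn := nrm_lt v.length idx hidx.1 hidx.2
    simp only [childA]
    rw [pyGetD_nrmL v idx false v.length rfl hidx.1 hidx.2]
    by_cases hv : v.getD (nrm v.length idx) false
    · rw [if_pos hv]
      exact ih v d total hL hadjL hA (fun x hx => hR x (List.mem_cons_of_mem _ hx)) hI hfc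
    · rw [if_neg hv]
      have hvfalse : v.getD (nrm v.length idx) false = false := by
        cases hx : v.getD (nrm v.length idx) false
        · rfl
        · exact absurd hx hv
      have hfc1 := fcount_set_eq v (nrm v.length idx) hnn hvfalse
      have hsome := hSufD idx v d hL hadjL hA hidx hvfalse hI (by omega)
      cases hd : dfsA adj fuel idx v d with
      | none => rw [hd] at hsome; simp at hsome
      | some res =>
        obtain ⟨r, v2, d2⟩ := res
        simp only []
        obtain ⟨e1, e2, e3, e4, e5, e6⟩ := (master adj fuel).1 idx v d r v2 d2 hL hadjL hA hidx hvfalse hI hd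
        have hd2len : d2.length = v.length := by rw [e2, ← hL]
        have he6 : d2.getD (nrm v.length idx) 0 = r := by
          rw [← pyGetD_nrmL d2 idx 0 v.length hd2len hidx.1 hidx.2]; exact e6
        have hset : PySem.List.pySetD d2 idx r = d2 := by
          rw [pySetD_nrmL d2 idx r v.length hd2len hidx.1 hidx.2, ← he6]
          exact set_getD_self d2 (nrm v.length idx)
        rw [hset]
        exact ih v2 d2 _ (by rw [e1, e2, hL]) (by rw [e1]; exact hadjL) (by rw [e1]; exact hA)
          (fun x hx => by rw [e1]; exact hR x (List.mem_cons_of_mem _ hx)) e5 (by omega)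

theorem suf (adj : List (List Int)) (fuel : Nat) : SufDstmt adj fuel := by
  induction fuel with
  | zero => intro num v d _ _ _ _ _ _ hfc; exact absurd hfc (Nat.not_lt_zero _)
  | succ f ih =>
    intro num v d hL hadjL hA hIn hunv hI hfc
    simp only [dfsA]
    rw [pySetD_nrmL v num true v.length rfl hIn.1 hIn.2]
    rw [pyGetD_nrmL adj num [] v.length hadjL hIn.1 hIn.2]
    have hNR : ∀ x ∈ adj.getD (nrm v.length num) [], InR v.length x := by
      rw [← pyGetD_nrmL adj num [] v.length hadjL hIn.1 hIn.2]
      exact adjOK_getD hA num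
    by_cases hc : 1 < (adj.getD (nrm v.length num) []).length ∨ num = 1
    · rw [if_pos hc]
      have hsome := sufC adj f ih (adj.getD (nrm v.length num) []) (v.set (nrm v.length num) true) d 0
        (by rw [List.length_set]; exact hL) (by rw [List.length_set]; exact hadjL)
        (by rw [List.length_set]; exact hA)
        (by rw [List.length_set]; exact hNR)
        (inv_set_true hI (nrm v.length num)) (by omega)
      cases hch : childA (dfsA adj f) (adj.getD (nrm v.length num) [])
          (v.set (nrm v.length num) true) d 0 with
      | none => rw [hch] at hsome; simp at hsome
      | some res => obtain ⟨total, v2, d2⟩ := res; simp only []; rfl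
    · rw [if_neg hc]; simp

-- ===== simulation: B's stack loop computes exactly A's recursion =====
def bump : List (Int × Nat × Int) → Int → List (Int × Nat × Int)
  | [], _ => []
  | (pn, pi, pt) :: S, r => (pn, pi, pt + r) :: S

theorem bump_zero (S : List (Int × Nat × Int)) : bump S 0 = S := by
  cases S with
  | nil => rfl
  | cons f S' => obtain ⟨pn, pi, pt⟩ := f; simp [bump]

theorem dfsA_set_self (adj : List (List Int)) (fuel : Nat) (num : Int) (v : List Bool) (d : List Int) :
    dfsA adj fuel num (PySem.List.pySetD v num true) d = dfsA adj fuel num v d := by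
  cases fuel with
  | zero => rfl
  | succ f => simp [dfsA, pySetD_idem]

theorem loopB_skip (adj : List (List Int)) (fuel : Nat) (num : Int) (i : Nat) (total : Int)
    (S : List (Int × Nat × Int)) (v : List Bool) (d : List Int)
    (hi : i < (PySem.List.pyGetD adj num []).length)
    (hvis : PySem.List.pyGetD v ((PySem.List.pyGetD adj num []).getD i 0) false = true) :
    loopB adj fuel ((num, i, total) :: S) v d = loopB adj fuel ((num, i+1, total) :: S) v d := by
  cases fuel with
  | zero => rfl
  | succ f =>
    have hdrop : (PySem.List.pyGetD adj num []).drop i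
        = (PySem.List.pyGetD adj num []).getD i 0 :: (PySem.List.pyGetD adj num []).drop (i+1) := by
      rw [← List.getElem_cons_drop (h := hi), List.getD_eq_getElem _ _ hi]
    simp only [loopB]
    rw [hdrop]
    simp only [advB]
    rw [hvis]
    simp

def SimDstmt (adj : List (List Int)) (fuel : Nat) : Prop :=
  ∀ num v d r v' d' (S : List (Int × Nat × Int)), v.length = d.length → adj.length = v.length →
    AdjOK adj v.length → InR v.length num → VInv v d →
    PySem.List.pySetD v num true = v →
    dfsA adj fuel num v d = some (r, v', d') →
    ∃ k, k + 3 * v'.count false ≤ 3 * v.count false + 2 ∧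
      ∀ f, loopB adj (k + f) ((num, 0, 0) :: S) v d = loopB adj f (bump S r) v' d'

def SimCstmt (adj : List (List Int)) (fuel : Nat) : Prop :=
  ∀ lst i num total v d t' v' d' (S : List (Int × Nat × Int)), v.length = d.length →
    adj.length = v.length → AdjOK adj v.length → InR v.length num → VInv v d →
    (PySem.List.pyGetD adj num []).drop i = lst →
    (1 < (PySem.List.pyGetD adj num []).length ∨ num = 1) →
    v.getD (nrm v.length num) false = true →
    childA (dfsA adj fuel) lst v d total = some (t', v', d') →
    ∃ k, k + 3 * v'.count false ≤ 3 * v.count false + 1 ∧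
      ∀ f, loopB adj (k + f) ((num, i, total) :: S) v d
          = loopB adj f
              (bump S (PySem.List.pyGetD
                (PySem.List.pySetD d' num (((PySem.List.pyGetD adj num []).length : Int) - 1 + t')) num 0))
              v' (PySem.List.pySetD d' num (((PySem.List.pyGetD adj num []).length : Int) - 1 + t'))

theorem simCaux (adj : List (List Int)) (fuel : Nat) (hSimD : SimDstmt adj fuel) : SimCstmt adj fuel := by
  intro lst
  induction lst with
  | nil =>
    intro i num total v d t' v' d' S hL hadjL hA hIn hI hdrop hc hm hs
    simp only [childA, Option.some.injEq, Prod.mk.injEq] at hs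
    obtain ⟨h1, h2, h3⟩ := hs
    subst h1; subst h2; subst h3
    refine ⟨1, by omega, ?_⟩
    intro f
    rw [Nat.add_comm 1 f]
    simp only [loopB]
    rw [if_pos hc, hdrop]
    simp only [advB]
    have hlen : (PySem.List.pyGetD adj num []).length ≤ i := List.drop_eq_nil_iff.mp hdrop
    rw [if_neg (Nat.not_lt.mpr hlen)]
    cases S with
    | nil => simp [bump, loopB]
    | cons fr S' => obtain ⟨pn, pi, pt⟩ := fr; simp [bump]
  | cons idx rest ih =>
    intro i num total v d t' v' d' S hL hadjL hA hIn hI hdrop hc hm hs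
    have hi : i < (PySem.List.pyGetD adj num []).length := by
      by_contra hno
      have h0 := List.drop_eq_nil_iff.mpr (Nat.le_of_not_lt hno)
      rw [hdrop] at h0
      simp at h0
    have hcons := List.getElem_cons_drop (as := PySem.List.pyGetD adj num []) (h := hi)
    rw [hdrop] at hcons
    have hgetd : (PySem.List.pyGetD adj num []).getD i 0 = idx := by
      rw [List.getD_eq_getElem _ _ hi]
      exact (List.cons.injEq _ _ _ _ ▸ hcons).1
    have hdrop1 : (PySem.List.pyGetD adj num []).drop (i+1) = rest :=
      (List.cons.injEq _ _ _ _ ▸ hcons).2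
    have hmem : idx ∈ PySem.List.pyGetD adj num [] :=
      List.mem_of_mem_drop (by rw [hdrop]; exact List.mem_cons_self)
    have hidx : InR v.length idx := adjOK_getD hA num idx hmem
    have hnn := nrm_lt v.length idx hidx.1 hidx.2
    simp only [childA] at hs
    rw [pyGetD_nrmL v idx false v.length rfl hidx.1 hidx.2] at hs
    by_cases hvis : v.getD (nrm v.length idx) false
    · rw [if_pos hvis] at hs
      obtain ⟨k, hk, hloop⟩ := ih (i+1) num total v d t' v' d' S hL hadjL hA hIn hI hdrop1 hc hm hs
      refine ⟨k, hk, ?_⟩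
      intro f
      rw [loopB_skip adj (k+f) num i total S v d hi
        (by rw [hgetd, pyGetD_nrmL v idx false v.length rfl hidx.1 hidx.2]; exact hvis)]
      exact hloop f
    · rw [if_neg hvis] at hs
      have hvfalse : v.getD (nrm v.length idx) false = false := by
        cases hx : v.getD (nrm v.length idx) false
        · rfl
        · exact absurd hx hvis
      cases hd : dfsA adj fuel idx v d with
      | none => rw [hd] at hs; simp at hs
      | some res =>
        obtain ⟨r1, v2, d2⟩ := res
        rw [hd] at hs
        simp only [] at hs
        obtain ⟨e1, e2, e3, e4, e5, e6⟩ := (master adj fuel).1 idx v d r1 v2 d2 hL hadjL hA hidx hvfalse hI hd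
        have hd2len : d2.length = v.length := by rw [e2, ← hL]
        have he6 : d2.getD (nrm v.length idx) 0 = r1 := by
          rw [← pyGetD_nrmL d2 idx 0 v.length hd2len hidx.1 hidx.2]; exact e6
        have hset : PySem.List.pySetD d2 idx r1 = d2 := by
          rw [pySetD_nrmL d2 idx r1 v.length hd2len hidx.1 hidx.2, ← he6]
          exact set_getD_self d2 (nrm v.length idx)
        rw [hset, e6] at hs
        have hd1 : dfsA adj fuel idx (PySem.List.pySetD v idx true) d = some (r1, v2, d2) := by
          rw [dfsA_set_self]; exact hd
        have hsetv : PySem.List.pySetD v idx true = v.set (nrm v.length idx) true :=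
          pySetD_nrmL v idx true v.length rfl hidx.1 hidx.2
        obtain ⟨k1, hk1, hloop1⟩ := hSimD idx (PySem.List.pySetD v idx true) d r1 v2 d2
          ((num, i+1, total) :: S)
          (by rw [PySem.List.length_pySetD]; exact hL)
          (by rw [PySem.List.length_pySetD]; exact hadjL)
          (by rw [PySem.List.length_pySetD]; exact hA)
          (by rw [PySem.List.length_pySetD]; exact hidx)
          (by rw [hsetv]; exact inv_set_true hI (nrm v.length idx))
          (pySetD_idem v idx true) hd1
        have hm2 : v2.getD (nrm v2.length num) false = true := by
          rw [e1]
          exact e3 (nrm v.length num) (getD_set_true v (nrm v.length idx) (nrm v.length num) hm)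
        obtain ⟨k2, hk2, hloop2⟩ := ih (i+1) num (total + r1) v2 d2 t' v' d' S
          (by rw [e1, e2, hL]) (by rw [e1]; exact hadjL) (by rw [e1]; exact hA)
          (by rw [e1]; exact hIn) e5 hdrop1 hc hm2 hs
        have hcnt : (PySem.List.pySetD v idx true).count false
            = (v.set (nrm v.length idx) true).count false := by rw [hsetv]
        refine ⟨1 + k1 + k2, ?_, ?_⟩
        · have hfc := fcount_set_eq v (nrm v.length idx) hnn hvfalse
          rw [List.count] at hfc hk1 hk2 hcnt ⊢
          omega
        · intro f
          have hstep : (1 + k1 + k2) + f = (k1 + (k2 + f)) + 1 := by omega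
          rw [hstep]
          simp only [loopB]
          rw [if_pos hc, hdrop]
          simp only [advB]
          rw [pyGetD_nrmL v idx false v.length rfl hidx.1 hidx.2, hvfalse]
          simp only [Bool.false_eq_true, if_false]
          rw [if_pos hi, hgetd, hloop1 (k2 + f)]
          simp only [bump]
          exact hloop2 f

theorem simDstep (adj : List (List Int)) (fuel : Nat) (hSimC : SimCstmt adj fuel) : SimDstmt adj (fuel+1) := by
  intro num v d r v' d' S hL hadjL hA hIn hI hv hs
  simp only [dfsA] at hs
  rw [hv] at hs
  by_cases hc : 1 < (PySem.List.pyGetD adj num []).length ∨ num = 1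
  · rw [if_pos hc] at hs
    cases hch : childA (dfsA adj fuel) (PySem.List.pyGetD adj num []) v d 0 with
    | none => rw [hch] at hs; simp at hs
    | some res =>
      obtain ⟨total, v2, d2⟩ := res
      rw [hch] at hs
      simp only [Option.some.injEq, Prod.mk.injEq] at hs
      obtain ⟨hr, hv2, hd2⟩ := hs
      subst hv2; subst hd2
      have hm : v.getD (nrm v.length num) false = true := by
        have h8 := getD_set_self_true v (nrm v.length num) (nrm_lt v.length num hIn.1 hIn.2)
        have h9 : v.set (nrm v.length num) true = v := by
          rw [← pySetD_nrmL v num true v.length rfl hIn.1 hIn.2]; exact hv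
        rw [h9] at h8
        exact h8
      obtain ⟨k, hk, hloop⟩ := hSimC (PySem.List.pyGetD adj num []) 0 num 0 v d total v2 d2 S
        hL hadjL hA hIn hI List.drop_zero hc hm hch
      refine ⟨k, by omega, ?_⟩
      intro f'
      rw [hloop f', hr]
  · rw [if_neg hc] at hs
    simp only [Option.some.injEq, Prod.mk.injEq] at hs
    obtain ⟨hr, hv2, hd2⟩ := hs
    subst hv2; subst hd2
    refine ⟨1, by omega, ?_⟩
    intro f'
    rw [Nat.add_comm 1 f']
    simp only [loopB]
    rw [if_neg hc, ← hr, bump_zero]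

theorem simAll (adj : List (List Int)) (fuel : Nat) : SimDstmt adj fuel ∧ SimCstmt adj fuel := by
  induction fuel with
  | zero =>
    have hD : SimDstmt adj 0 := by intro num v d r v' d' S _ _ _ _ _ _ hs; simp [dfsA] at hs
    exact ⟨hD, simCaux adj 0 hD⟩
  | succ f ih =>
    have hD : SimDstmt adj (f+1) := simDstep adj f ih.2
    exact ⟨hD, simCaux adj (f+1) hD⟩

-- ===== the adjacency list built from in-range wires is AdjOK, and keeps its length =====
theorem buildAdj_len (n : Int) (wires : List (List Int)) :
    (buildAdjA n wires).length = (n+1).toNat := by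
  unfold buildAdjA
  have key : ∀ (ws : List (List Int)) (acc : List (List Int)),
      (ws.foldl (fun adj wire =>
        let a := PySem.List.pyGetD wire 0 0
        let b := PySem.List.pyGetD wire 1 0
        let adj1 := PySem.List.pySetD adj a ((PySem.List.pyGetD adj a []) ++ [b])
        PySem.List.pySetD adj1 b ((PySem.List.pyGetD adj1 b []) ++ [a])) acc).length = acc.length := by
    intro ws
    induction ws with
    | nil => intro acc; rfl
    | cons w ws ihw =>
      intro acc
      rw [List.foldl_cons, ihw]
      simp [PySem.List.length_pySetD]
  rw [key]
  simp

theorem buildAdj_ok (n : Int) (wires : List (List Int)) (hn2 : 2 ≤ n)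
    (hw : ∀ w ∈ wires, 2 ≤ w.length ∧
      -(n+1) ≤ PySem.List.pyGetD w 0 0 ∧ PySem.List.pyGetD w 0 0 ≤ n ∧
      -(n+1) ≤ PySem.List.pyGetD w 1 0 ∧ PySem.List.pyGetD w 1 0 ≤ n) :
    AdjOK (buildAdjA n wires) (n+1).toNat := by
  have key : ∀ (ws : List (List Int)) (acc : List (List Int)),
      (∀ w ∈ ws, 2 ≤ w.length ∧
        -(n+1) ≤ PySem.List.pyGetD w 0 0 ∧ PySem.List.pyGetD w 0 0 ≤ n ∧
        -(n+1) ≤ PySem.List.pyGetD w 1 0 ∧ PySem.List.pyGetD w 1 0 ≤ n) →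
      (∀ lst ∈ acc, ∀ x ∈ lst, -(n+1) ≤ x ∧ x ≤ n) →
      ∀ lst ∈ ws.foldl (fun adj wire =>
        let a := PySem.List.pyGetD wire 0 0
        let b := PySem.List.pyGetD wire 1 0
        let adj1 := PySem.List.pySetD adj a ((PySem.List.pyGetD adj a []) ++ [b])
        PySem.List.pySetD adj1 b ((PySem.List.pyGetD adj1 b []) ++ [a])) acc,
        ∀ x ∈ lst, -(n+1) ≤ x ∧ x ≤ n := by
    intro ws
    induction ws with
    | nil => intro acc _ hacc; exact hacc
    | cons w ws ihw =>
      intro acc hws hacc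
      refine ihw _ (fun u hu => hws u (List.mem_cons_of_mem _ hu)) ?_
      obtain ⟨_, ha1, ha2, hb1, hb2⟩ := hws w List.mem_cons_self
      have hmid : ∀ lst ∈ PySem.List.pySetD acc (PySem.List.pyGetD w 0 0)
          ((PySem.List.pyGetD acc (PySem.List.pyGetD w 0 0) []) ++ [PySem.List.pyGetD w 1 0]),
          ∀ x ∈ lst, -(n+1) ≤ x ∧ x ≤ n := by
        intro lst hlst x hx
        rcases mem_pySetD hlst with h | h
        · exact hacc lst h x hx
        · subst h
          rcases List.mem_append.mp hx with h2 | h2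
          · rcases pyGetD_mem_or acc (PySem.List.pyGetD w 0 0) ([] : List Int) with hg | hg
            · exact hacc _ hg x h2
            · rw [hg] at h2; simp at h2
          · simp at h2; subst h2; exact ⟨hb1, hb2⟩
      intro lst hlst x hx
      rcases mem_pySetD hlst with h | h
      · exact hmid lst h x hx
      · subst h
        rcases List.mem_append.mp hx with h2 | h2
        · rcases pyGetD_mem_or (PySem.List.pySetD acc (PySem.List.pyGetD w 0 0)
              ((PySem.List.pyGetD acc (PySem.List.pyGetD w 0 0) []) ++ [PySem.List.pyGetD w 1 0]))
              (PySem.List.pyGetD w 1 0) ([] : List Int) with hg | hg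
          · exact hmid _ hg x h2
          · rw [hg] at h2; simp at h2
        · simp at h2; subst h2; exact ⟨ha1, ha2⟩
  intro lst hlst x hx
  have hbase : ∀ l ∈ List.replicate (n+1).toNat ([] : List Int), ∀ x ∈ l, -(n+1) ≤ x ∧ x ≤ n := by
    intro l hl x hx2
    rw [List.eq_of_mem_replicate hl] at hx2
    simp at hx2
  have hres := key wires (List.replicate (n+1).toNat []) hw hbase lst hlst x hx
  constructor <;> omega

-- ===== the final running-min pass equals min of the mapped list =====
theorem runmin_some (f : Int → Int) (t : List Int) (b : Int) :
    t.foldl (fun best x =>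
      match best with
      | none => some (f x)
      | some bb => if f x < bb then some (f x) else some bb) (some b)
    = some ((t.map f).foldl min b) := by
  induction t generalizing b with
  | nil => rfl
  | cons a t ih =>
    simp only [List.foldl, List.map]
    have h2 : (if f a < b then some (f a) else some b) = some (min b (f a)) := by
      by_cases h : f a < b <;> simp [h, min_def]
    rw [h2, ih]

-- ===== VERDICT (by name: the statement is the Claim_ definition above) =====
theorem solution_spec : Claim_equal_solution := by
  intro n wires _ hpre
  unfold Spec_solution
  obtain ⟨hn2, hw⟩ := hpre
  have hok : AdjOK (buildAdjA n wires) (n+1).toNat := buildAdj_ok n wires hn2 hw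
  have hlenAdj : (buildAdjA n wires).length = (n+1).toNat := buildAdj_len n wires
  have hN3 : 3 ≤ (n+1).toNat := by omega
  have hI0 : VInv (List.replicate (n+1).toNat false) (List.replicate (n+1).toNat (0:Int)) :=
    fun j _ => getD_replicate_int _ j
  have hIn1 : InR (List.replicate (n+1).toNat false).length 1 := by
    constructor <;> simp <;> omega
  have hsome := suf (buildAdjA n wires) ((n+1).toNat + 1) 1
      (List.replicate (n+1).toNat false) (List.replicate (n+1).toNat (0:Int))
      (by simp) (by simpa using hlenAdj) (by simpa using hok) hIn1
      (getD_replicate_bool _ _) hI0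
      (by have h2 := fcount_set_le (List.replicate (n+1).toNat false)
            (nrm (List.replicate (n+1).toNat false).length 1)
          have hc : (List.replicate (n+1).toNat false).count false = (n+1).toNat := by simp
          omega)
  cases hres : dfsA (buildAdjA n wires) ((n+1).toNat + 1) 1
      (List.replicate (n+1).toNat false) (List.replicate (n+1).toNat (0:Int)) with
  | none => rw [hres] at hsome; simp at hsome
  | some res =>
    obtain ⟨r, vf, df⟩ := res
    obtain ⟨e1, e2, e3, e4, e5, e6⟩ := (master (buildAdjA n wires) ((n+1).toNat + 1)).1 1
      (List.replicate (n+1).toNat false) (List.replicate (n+1).toNat (0:Int)) r vf df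
      (by simp) (by simpa using hlenAdj) (by simpa using hok) hIn1
      (getD_replicate_bool _ _) hI0 hres
    have hdflen : df.length = (n+1).toNat := by rw [e2]; simp
    have hdfset : PySem.List.pySetD df 1 r = df := by
      rw [PySem.List.pySetD_of_nonneg df r (by norm_num)]
      have he6 : df.getD 1 0 = r := by
        have h8 := e6
        rw [PySem.List.pyGetD_of_nonneg df 0 (by norm_num)] at h8
        exact h8
      rw [← he6]
      exact set_getD_self df 1
    -- the value A computes
    have hA : solution n wires
        = (PySem.List.min? ((df.drop 2).map (fun x => |n - 2 * (x + 1)|)) (fun x => x)).getD 0 := by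
      simp only [solution]
      rw [hres]
      simp only [hdfset]
      have hsl : PySem.List.slice df (some 2) none = df.drop 2 := by
        have h3 := PySem.List.slice_from_natCast df 2
        simpa using h3
      rw [hsl, List.map_map]
      rfl
    -- the simulation: B's loop reaches the same final state
    have hd1 : dfsA (buildAdjA n wires) ((n+1).toNat + 1) 1
        (PySem.List.pySetD (List.replicate (n+1).toNat false) 1 true)
        (List.replicate (n+1).toNat (0:Int))
        = some (r, vf, df) := by
      rw [dfsA_set_self]; exact hres
    have hv1eq : PySem.List.pySetD (List.replicate (n+1).toNat false) 1 true
        = (List.replicate (n+1).toNat false).set 1 true := by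
      rw [PySem.List.pySetD_of_nonneg _ _ (by norm_num : (0:Int) ≤ 1)]
      rfl
    obtain ⟨k, hk, hloop⟩ := (simAll (buildAdjA n wires) ((n+1).toNat + 1)).1 1
      (PySem.List.pySetD (List.replicate (n+1).toNat false) 1 true)
      (List.replicate (n+1).toNat (0:Int)) r vf df []
      (by rw [PySem.List.length_pySetD]; simp)
      (by rw [PySem.List.length_pySetD]; simpa using hlenAdj)
      (by rw [PySem.List.length_pySetD]; simpa using hok)
      (by rw [PySem.List.length_pySetD]; exact hIn1)
      (by rw [hv1eq]; exact inv_set_true hI0 1)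
      (pySetD_idem _ 1 true) hd1
    have hfcset : (PySem.List.pySetD (List.replicate (n+1).toNat false) 1 true).count false + 1
        = (n+1).toNat := by
      rw [hv1eq]
      have h5 := fcount_set_eq (List.replicate (n+1).toNat false) 1 (by simp; omega)
        (getD_replicate_bool _ 1)
      simpa using h5
    have hkB : k ≤ 3 * (n+1).toNat + 3 := by omega
    have hloopB : loopB (buildAdjA n wires) (3 * (n+1).toNat + 3) [(1,0,0)]
        (PySem.List.pySetD (List.replicate (n+1).toNat false) 1 true)
        (List.replicate (n+1).toNat (0:Int))
        = some (vf, df) := by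
      have h6 := hloop (3 * (n+1).toNat + 3 - k)
      rw [Nat.add_sub_cancel' hkB] at h6
      rw [h6]
      have hb : bump [] r = [] := rfl
      rw [hb]
      cases hf : 3 * (n + 1).toNat + 3 - k with
      | zero => rfl
      | succ m => rfl
    -- the value B computes
    have hne : df.drop 2 ≠ [] := by
      have h7 : (df.drop 2).length = df.length - 2 := List.length_drop ..
      intro hnil
      rw [hnil] at h7
      simp at h7
      omega
    obtain ⟨y, t, hyt⟩ := List.exists_cons_of_ne_nil hne
    have hB : solution_alt n wires
        = ((df.drop 2).foldl (fun best x =>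
            match best with
            | none => some (|n - 2 * (x + 1)|)
            | some b => if |n - 2 * (x + 1)| < b then some (|n - 2 * (x + 1)|) else some b) none).getD 0 := by
      simp only [solution_alt]
      have hbb : buildAdjB n wires = buildAdjA n wires := rfl
      rw [hbb, hloopB]
      simp only []
      have hlen2 : (n + 1 : Int) = (df.length : Int) := by rw [hdflen]; omega
      rw [hlen2]
      rw [PySem.List.foldl_pyRange_pyGetD' df 0 (fun best x =>
            match best with
            | none => some (|n - 2 * (x + 1)|)
            | some b => if |n - 2 * (x + 1)| < b then some (|n - 2 * (x + 1)|) else some b) none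
          (by omega)]
      rfl
    rw [hA, hB, hyt]
    simp only [List.map_cons, List.foldl_cons]
    rw [PySem.List.min?_id_cons, runmin_some]
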